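-- pv_equiv track=rewrite | github.com/walidk/AGT-stackelberg | code/par_hq_network.py | social_optimum
-- ===== SOURCE A (Python) =====
-- MODE_FF = 0
--
-- def link_state(flow,mode):
--   return (flow,mode)
--
-- def link_c(link):
--   return link[2]
--
-- def social_optimum(network,r):
--   n = n_links(network)
--   flows = [0]*n
--   modes = [MODE_FF]*n
--   flow_remaining = r
--   for i, link in enumerate(network):
--     c = link_c(link)
--     if c > flow_remaining:
--       flows[i] = flow_remaining
--       return [link_state(*pair) for pair in zip(flows,modes)]
--     flows[i] = c
--     flow_remaining-=c
--   raise Exception('too much flow')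
--
-- def n_links(network):
--   return len(network)
-- ===== SOURCE B (Python) =====
-- MODE_FF = 0
--
-- def link_state(flow, mode):
--   return (flow, mode)
--
-- def link_c(link):
--   return link[2]
--
-- def n_links(network):
--   return len(network)
--
-- def social_optimum(network, r):
--   caps = [link_c(link) for link in network]
--   cum = []
--   t = 0
--   for c in caps:
--     t += c
--     cum.append(t)
--   for i, t in enumerate(cum):
--     if t > r:
--       prev = cum[i - 1] if i else 0
--       flows = caps[:i] + [r - prev] + [0] * (len(caps) - i - 1)
--       return [link_state(f, MODE_FF) for f in flows]
--   raise Exception('too much flow')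
-- ===== Notes on version B (the rewrite author's own statement) =====
-- stated objective: alternative
-- what changed: B replaces A's single stateful loop (mutating a preallocated flows array while decrementing the remaining flow) by two passes: it first builds the cumulative-capacity list, then finds the first index whose cumulative sum strictly exceeds r and assembles the result by list slicing/arithmetic.
import Mathlib
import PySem

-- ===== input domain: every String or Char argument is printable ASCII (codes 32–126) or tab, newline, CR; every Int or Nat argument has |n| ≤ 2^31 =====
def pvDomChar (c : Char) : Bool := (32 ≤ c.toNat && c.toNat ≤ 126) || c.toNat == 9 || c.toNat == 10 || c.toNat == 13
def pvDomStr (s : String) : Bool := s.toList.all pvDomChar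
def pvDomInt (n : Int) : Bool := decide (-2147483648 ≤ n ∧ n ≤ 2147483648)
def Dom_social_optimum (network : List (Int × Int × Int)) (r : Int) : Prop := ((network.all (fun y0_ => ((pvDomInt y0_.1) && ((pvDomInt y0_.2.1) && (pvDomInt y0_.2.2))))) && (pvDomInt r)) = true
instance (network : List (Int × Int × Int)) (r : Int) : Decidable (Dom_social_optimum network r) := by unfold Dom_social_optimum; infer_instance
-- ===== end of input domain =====

-- B builds a cumulative-capacity list, then splits at the first index whose cumulative sum
-- strictly exceeds r (two-pass, slicing), instead of A's single mutating loop; objective: alternative.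


-- ===== PORT A =====
-- A's loop over `enumerate(network)` with the early return, as structural recursion over the
-- links with the `flow_remaining` accumulator; `none` = the loop fell through and A raises
-- 'too much flow'.  Setting flows[i] = flow_remaining and returning the (still all-zero
-- after i) flows array is `rem :: List.replicate ls.length 0` for the suffix.
def soLoop (links : List (Int × Int × Int)) (rem : Int) : Option (List Int) :=
  match links with
  | [] => none
  | l :: ls =>
    let c := l.2.2                      -- c = link_c(link)
    if c > rem then some (rem :: List.replicate ls.length 0)
    else (soLoop ls (rem - c)).map (fun fs => c :: fs)

def social_optimum (network : List (Int × Int × Int)) (r : Int) : List (Int × Int) :=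
  -- [link_state(*pair) for pair in zip(flows, modes)], modes all MODE_FF = 0
  ((soLoop network r).getD []).map (fun f => (f, 0))

-- ===== PORT B =====
-- cumulative sums, as Source B's first loop (accumulator t)
def soCum (t : Int) (caps : List Int) : List Int :=
  match caps with
  | [] => []
  | c :: cs => (t + c) :: soCum (t + c) cs

def social_optimum_alt (network : List (Int × Int × Int)) (r : Int) : List (Int × Int) :=
  let caps := network.map (fun l => l.2.2)
  let cum := soCum 0 caps
  match cum.findIdx? (fun t => t > r) with   -- Source B's scan for the first i with cum[i] > r
  | none => []                               -- Source B raises here (excluded by Pre_)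
  | some i =>
    let prev := if i = 0 then 0 else cum.getD (i - 1) 0
    let flows := caps.take i ++ [r - prev] ++ List.replicate (caps.length - i - 1) 0
    flows.map (fun f => (f, 0))

-- ===== PRECONDITION & SPEC =====
-- Pre_ excludes exactly the inputs on which A raises Exception('too much flow'):
-- some prefix sum of the capacities must strictly exceed r.
def Pre_social_optimum (network : List (Int × Int × Int)) (r : Int) : Prop :=
  ∃ i ∈ Finset.range network.length, ((network.take (i + 1)).map (fun l => l.2.2)).sum > r

instance (network : List (Int × Int × Int)) (r : Int) : Decidable (Pre_social_optimum network r) := by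
  unfold Pre_social_optimum; infer_instance

def pvWitness_social_optimum : (List (Int × Int × Int)) × Int := ([(0, 0, 3), (0, 0, 4)], 5)

def Spec_social_optimum (network : List (Int × Int × Int)) (r : Int) (out : List (Int × Int)) : Prop := out = social_optimum_alt network r
instance (network : List (Int × Int × Int)) (r : Int) (out : List (Int × Int)) : Decidable (Spec_social_optimum network r out) := by unfold Spec_social_optimum; infer_instance

-- ===== CLAIM (what is proved, stated in full; the proofs are below) =====
def Claim_equal_social_optimum : Prop := ∀ (network : List (Int × Int × Int)) (r : Int), Dom_social_optimum network r → Pre_social_optimum network r → Spec_social_optimum network r (social_optimum network r)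

-- ===== LEMMAS AND PROOFS =====

theorem soCum_shift (caps : List Int) (t : Int) :
    soCum t caps = (soCum 0 caps).map (fun x => t + x) := by
  induction caps generalizing t with
  | nil => simp [soCum]
  | cons c cs ih =>
    simp only [soCum, List.map_cons, zero_add, ih (t + c), ih c, List.map_map]
    simp only [Function.comp_def, add_assoc]

theorem soCum_length (caps : List Int) (t : Int) : (soCum t caps).length = caps.length := by
  induction caps generalizing t with
  | nil => rfl
  | cons c cs ih => simp [soCum, ih]

theorem findIdx_shift (caps : List Int) (c r : Int) :
    (soCum c caps).findIdx? (fun t => t > r) =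
      (soCum 0 caps).findIdx? (fun t => t > r - c) := by
  rw [soCum_shift caps c, List.findIdx?_map]
  congr 1; funext x; simp [Function.comp]; constructor <;> intro h <;> omega

-- if the head capacity does not exceed r, Pre_ passes to the tail with the head consumed
theorem pre_tail (l : Int × Int × Int) (ls : List (Int × Int × Int)) (r : Int)
    (hc : ¬ l.2.2 > r) (h : Pre_social_optimum (l :: ls) r) :
    Pre_social_optimum ls (r - l.2.2) := by
  obtain ⟨i, hi, hsum⟩ := h
  simp only [Finset.mem_range, List.length_cons] at hi
  cases i with
  | zero => simp at hsum; omega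
  | succ k =>
    refine ⟨k, ?_, ?_⟩
    · simp only [Finset.mem_range]; omega
    · simp only [List.take_succ_cons, List.map_cons, List.sum_cons] at hsum
      omega

theorem hit_of_pre (network : List (Int × Int × Int)) (r : Int)
    (h : Pre_social_optimum network r) :
    ((soCum 0 (network.map (fun x => x.2.2))).findIdx? (fun t => t > r)).isSome := by
  induction network generalizing r with
  | nil => exact absurd h (by simp [Pre_social_optimum])
  | cons l ls ih =>
    simp only [List.map_cons, soCum, zero_add, List.findIdx?_cons]
    by_cases hc : l.2.2 > r
    · simp [hc]
    · rw [if_neg (by simpa using hc), findIdx_shift]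
      simpa using ih (r - l.2.2) (pre_tail l ls r hc h)

theorem loop_some (network : List (Int × Int × Int)) (r : Int)
    (h : Pre_social_optimum network r) : (soLoop network r).isSome := by
  induction network generalizing r with
  | nil => exact absurd h (by simp [Pre_social_optimum])
  | cons l ls ih =>
    simp only [soLoop]
    by_cases hc : l.2.2 > r
    · simp [hc]
    · simp only [if_neg hc, Option.isSome_map]
      exact ih (r - l.2.2) (pre_tail l ls r hc h)

-- getD of the shifted cumulative list at an in-range index
theorem soCum_getD (caps : List Int) (c : Int) (k : Nat) (hk : k < caps.length) :
    (soCum c caps).getD k 0 = c + (soCum 0 caps).getD k 0 := by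
  have h2 : k < (soCum 0 caps).length := by rw [soCum_length]; exact hk
  have hs : (soCum c caps)[k]? = ((soCum 0 caps).map (fun x => c + x))[k]? := by
    rw [soCum_shift caps c]
  rw [List.getElem?_map] at hs
  rw [List.getD_eq_getElem?_getD, List.getD_eq_getElem?_getD, hs,
    List.getElem?_eq_getElem h2]
  simp

-- B's step law: if the head capacity does not exceed r and the tail still has a hit,
-- B on l :: ls is (c, 0) consed onto B on ls with r - c.
theorem alt_step (l : Int × Int × Int) (ls : List (Int × Int × Int)) (r : Int)
    (hc : ¬ l.2.2 > r)
    (hhit : ((soCum 0 (ls.map (fun x => x.2.2))).findIdx? (fun t => t > r - l.2.2)).isSome) :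
    social_optimum_alt (l :: ls) r = (l.2.2, 0) :: social_optimum_alt ls (r - l.2.2) := by
  obtain ⟨j, hj⟩ := Option.isSome_iff_exists.mp hhit
  have hcum : soCum 0 (l.2.2 :: ls.map (fun x => x.2.2)) =
      l.2.2 :: soCum l.2.2 (ls.map (fun x => x.2.2)) := by simp [soCum]
  have hfind : (soCum 0 (l.2.2 :: ls.map (fun x => x.2.2))).findIdx? (fun t => t > r)
      = some (j + 1) := by
    rw [hcum, List.findIdx?_cons]
    simp only [decide_eq_true_eq]
    rw [if_neg hc, findIdx_shift, hj]
    rfl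
  have hjlen : j < (ls.map (fun x => x.2.2)).length := by
    have h := (List.findIdx?_eq_some_iff_findIdx_eq.mp hj).1
    simpa [soCum_length] using h
  have hprev : (soCum 0 (l.2.2 :: ls.map (fun x => x.2.2))).getD (j + 1 - 1) 0
      = l.2.2 + (if j = 0 then 0 else (soCum 0 (ls.map (fun x => x.2.2))).getD (j - 1) 0) := by
    rw [hcum]
    cases j with
    | zero => simp
    | succ k =>
      simp only [Nat.succ_sub_one, Nat.succ_ne_zero, reduceIte, List.getD_cons_succ]
      exact soCum_getD _ _ k (by simpa using Nat.lt_of_succ_lt hjlen)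
  simp only [social_optimum_alt, List.map_cons, hfind, hj]
  rw [if_neg (by omega : ¬ j + 1 = 0), hprev, List.take_succ_cons, sub_add_eq_sub_sub]
  have hlen : (l.2.2 :: ls.map (fun x => x.2.2)).length - (j + 1) - 1
      = (ls.map (fun x => x.2.2)).length - j - 1 := by simp
  rw [hlen]
  simp

-- the heart of the claim, by induction on the network
theorem AeqB (network : List (Int × Int × Int)) (r : Int)
    (h : Pre_social_optimum network r) :
    social_optimum network r = social_optimum_alt network r := by
  induction network generalizing r with
  | nil => exact absurd h (by simp [Pre_social_optimum])
  | cons l ls ih =>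
    by_cases hc : l.2.2 > r
    · -- A returns at the first link; B's first cumulative sum already exceeds r
      have hcum : soCum 0 (l.2.2 :: ls.map (fun x => x.2.2)) =
          l.2.2 :: soCum l.2.2 (ls.map (fun x => x.2.2)) := by simp [soCum]
      have hfind : ((l.2.2 :: soCum l.2.2 (ls.map (fun x => x.2.2))).findIdx?
          (fun t => t > r)) = some 0 := by
        rw [List.findIdx?_cons]; simp [hc]
      simp [social_optimum, soLoop, hc, social_optimum_alt, hcum, hfind]
    · have hPre' := pre_tail l ls r hc h
      rw [alt_step l ls r hc (hit_of_pre ls (r - l.2.2) hPre')]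
      obtain ⟨fs, hfs⟩ := Option.isSome_iff_exists.mp (loop_some ls (r - l.2.2) hPre')
      have hA : social_optimum (l :: ls) r = (l.2.2, 0) :: social_optimum ls (r - l.2.2) := by
        simp [social_optimum, soLoop, hc, hfs]
      rw [hA, ih (r - l.2.2) hPre']

-- ===== VERDICT (by name: the statement is the Claim_ definition above) =====
theorem social_optimum_spec : Claim_equal_social_optimum :=
  fun network r _ hPre => AeqB network r hPre
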